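-- pv_equiv track=rewrite | github.com/SimoneMorolli/FondamentiDiProgrammazione | Bonus/StringeVuoto/ex_string_vuoto.py | leetv
-- ===== SOURCE A (Python) =====
-- def characterToNumber(character: str) -> str:
--     newString = ""
--     if(character == "a" or character == "A"):
--         newString = "4"
--     elif(character == "i" or character == "I"):
--         newString = "1"
--     elif(character == "e" or character == "E"):
--         newString = "3"
--     elif(character == "o" or character == "O"):
--         newString = "0"
--     elif(character == "z" or character == "Z"):
--         newString = "7"
--     elif(character == "s" or character == "S"):
--         newString = "5"
--     elif(character == "g" or character == "G"):
--         newString = "9"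
--     else:
--         newString = "not"
--     return newString
--
-- def conditionCharacterToUpper(line: str) -> bool:
--     lowerControll = line == "f" or line == "n" or line == "r" or line == "w" or line == "l" or line == "y" or line == "x"
--     return lowerControll
--
-- def conditionCharacterAlreadyUpper(line: str) -> bool:
--     upperControll = line == "F" or line == "N" or line == "R" or line == "W" or line == "L" or line == "Y" or line == "X"
--     return upperControll
--
-- def onlyLetterOrWhitespace(string: str) -> bool:
--     checkOnlyUpperLetter = 65 <= ord(string) <= 90
--     checkOnlyLowerLetter = 97 <= ord(string) <= 122
--     checkWhitespace = string == " "
--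
--     return checkOnlyLowerLetter or checkOnlyUpperLetter or checkWhitespace
--
-- def leetv(line):
--     characterCount = 0
--     newString = ""
--
--     for i in range(len(line)):
--         if(onlyLetterOrWhitespace(line[i])):
--             if(characterToNumber(line[i]) != "not"):
--                 newString += characterToNumber(line[i])
--                 characterCount += 1
--
--             elif(conditionCharacterToUpper(line[i]) or conditionCharacterAlreadyUpper(line[i])):
--                 newString += line[i].upper()
--
--                 if(conditionCharacterToUpper(line[i])):
--                     characterCount += 1
--
--             elif(line[i] == " "):
--                 newString += "_"
--                 characterCount += 1
--
--             elif(line[i].islower() != 1):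
--                 newString += line[i].lower()
--                 characterCount += 1
--             else:
--                 newString += line[i]
--         else:
--             newString += line[i]
--
--     return (newString, characterCount)
-- ===== SOURCE B (Python) =====
-- # One translation table char -> char, built once; the count is the number of changed positions.
-- _MAP = {}
-- for _lo, _d in {"a": "4", "i": "1", "e": "3", "o": "0", "z": "7", "s": "5", "g": "9"}.items():
--     _MAP[_lo] = _d
--     _MAP[_lo.upper()] = _d
-- for _lo in "fnrwlyx":
--     _MAP[_lo] = _lo.upper()
--     _MAP[_lo.upper()] = _lo.upper()
-- for _o in range(65, 91):
--     _ch = chr(_o)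
--     if _ch not in _MAP:
--         _MAP[_ch] = _ch.lower()
-- _MAP[" "] = "_"
--
--
-- def leetv(line):
--     new = "".join(_MAP.get(ch, ch) for ch in line)
--     count = sum(1 for a, b in zip(line, new) if a != b)
--     return (new, count)
-- ===== Notes on version B (the rewrite author's own statement) =====
-- stated objective: simpler
-- what changed: Replaces A's nested per-character if/elif chain of helper predicates with one precomputed char->char translation table applied in a single join, counting altered characters as the positions where the output differs from the input.
import Mathlib
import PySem

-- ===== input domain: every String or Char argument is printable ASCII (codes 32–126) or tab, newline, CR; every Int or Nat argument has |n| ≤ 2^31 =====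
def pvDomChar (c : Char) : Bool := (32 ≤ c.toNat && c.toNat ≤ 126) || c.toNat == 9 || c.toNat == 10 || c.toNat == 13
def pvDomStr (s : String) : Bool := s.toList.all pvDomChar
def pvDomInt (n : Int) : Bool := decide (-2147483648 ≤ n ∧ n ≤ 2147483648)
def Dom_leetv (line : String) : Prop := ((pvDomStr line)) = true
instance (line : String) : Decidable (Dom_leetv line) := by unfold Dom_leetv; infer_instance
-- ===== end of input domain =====

-- B replaces A's nested per-character if/elif chain by one precomputed translation table and counts
-- the changed positions (objective: simpler). Equivalence is proved for the return value.

-- ===== PORT A =====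
def characterToNumber (character : Char) : String :=
  if character = 'a' ∨ character = 'A' then "4"
  else if character = 'i' ∨ character = 'I' then "1"
  else if character = 'e' ∨ character = 'E' then "3"
  else if character = 'o' ∨ character = 'O' then "0"
  else if character = 'z' ∨ character = 'Z' then "7"
  else if character = 's' ∨ character = 'S' then "5"
  else if character = 'g' ∨ character = 'G' then "9"
  else "not"

def conditionCharacterToUpper (line : Char) : Bool :=
  line = 'f' || line = 'n' || line = 'r' || line = 'w' || line = 'l' || line = 'y' || line = 'x'

def conditionCharacterAlreadyUpper (line : Char) : Bool :=
  line = 'F' || line = 'N' || line = 'R' || line = 'W' || line = 'L' || line = 'Y' || line = 'X'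

def onlyLetterOrWhitespace (string : Char) : Bool :=
  let checkOnlyUpperLetter := 65 ≤ string.toNat && string.toNat ≤ 90
  let checkOnlyLowerLetter := 97 ≤ string.toNat && string.toNat ≤ 122
  let checkWhitespace := string = ' '
  checkOnlyLowerLetter || checkOnlyUpperLetter || checkWhitespace

-- the body of A's for-loop, verbatim (taking the current character line[i])
def leetvStep (st : List Char × Int) (c : Char) : List Char × Int :=
  if onlyLetterOrWhitespace c then
        if characterToNumber c ≠ "not" then
          (st.1 ++ (characterToNumber c).toList, st.2 + 1)
        else if conditionCharacterToUpper c || conditionCharacterAlreadyUpper c then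
          if conditionCharacterToUpper c then
            (st.1 ++ [PySem.Chars.upperChar c], st.2 + 1)
          else
            (st.1 ++ [PySem.Chars.upperChar c], st.2)
        else if c = ' ' then
          (st.1 ++ ['_'], st.2 + 1)
        else if PySem.Chars.islower c ≠ true then
          (st.1 ++ [PySem.Chars.lowerChar c], st.2 + 1)
        else
          (st.1 ++ [c], st.2)
      else
        (st.1 ++ [c], st.2)

def leetv (line : String) : String × Int :=
  let cs := line.toList
  let st := (PySem.List.pyRange 0 (cs.length : Int) 1).foldl
    (fun st i => leetvStep st (PySem.List.pyGetD cs i ' ')) ([], 0)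
  (String.ofList st.1, st.2)

-- ===== PORT B =====
-- the module-level table of Source B, built by the same three loops
def leetMap : PySem.Dict Char Char :=
  let m := (PySem.Dict.ofList
      [('a','4'),('i','1'),('e','3'),('o','0'),('z','7'),('s','5'),('g','9')]).items.foldl
    (fun m p => (m.insert p.1 p.2).insert (PySem.Chars.upperChar p.1) p.2) PySem.Dict.empty
  let m := "fnrwlyx".toList.foldl
    (fun m lo => (m.insert lo (PySem.Chars.upperChar lo)).insert
        (PySem.Chars.upperChar lo) (PySem.Chars.upperChar lo)) m
  let m := (PySem.List.pyRange 65 91 1).foldl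
    (fun m o =>
      let ch := Char.ofNat o.toNat
      if m.contains ch then m else m.insert ch (PySem.Chars.lowerChar ch)) m
  m.insert ' ' '_'

def leetv_alt (line : String) : String × Int :=
  let cs := line.toList
  let new := cs.map (fun ch => leetMap.getD ch ch)
  let count := (cs.zip new).countP (fun p => decide (p.1 ≠ p.2))
  (String.ofList new, (count : Int))

-- ===== PRECONDITION & SPEC =====
def Spec_leetv (line : String) (out : String × Int) : Prop := out = leetv_alt line
instance (line : String) (out : String × Int) : Decidable (Spec_leetv line out) := by unfold Spec_leetv; infer_instance

-- ===== CLAIM (what is proved, stated in full; the proofs are below) =====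
def Claim_equal_leetv : Prop := ∀ (line : String), Dom_leetv line → Spec_leetv line (leetv line)

-- ===== LEMMAS AND PROOFS =====

-- B's per-character translation
def leetG (c : Char) : Char := leetMap.getD c c

-- A's per-character effect: the characters appended and the count increment
def entryA (c : Char) : List Char × Int :=
  if onlyLetterOrWhitespace c then
    if characterToNumber c ≠ "not" then ((characterToNumber c).toList, 1)
    else if conditionCharacterToUpper c || conditionCharacterAlreadyUpper c then
      if conditionCharacterToUpper c then ([PySem.Chars.upperChar c], 1)
      else ([PySem.Chars.upperChar c], 0)
    else if c = ' ' then (['_'], 1)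
    else if PySem.Chars.islower c ≠ true then ([PySem.Chars.lowerChar c], 1)
    else ([c], 0)
  else ([c], 0)

-- the 98 characters of the input domain
def charsList : List Char := ((List.range' 32 95) ++ [9, 10, 13]).map Char.ofNat

lemma mem_charsList (c : Char) (h : pvDomChar c = true) : c ∈ charsList := by
  refine List.mem_map.2 ⟨c.toNat, ?_, Char.ofNat_toNat c⟩
  simp only [pvDomChar, Bool.or_eq_true, Bool.and_eq_true, decide_eq_true_eq, beq_iff_eq] at h
  simp only [List.mem_append, List.mem_range'_1, List.mem_cons]
  omega

-- on every domain character, A's effect is: B's translation, counted iff it changed the character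
set_option maxRecDepth 100000 in
lemma entryA_eq (c : Char) (h : c ∈ charsList) :
    entryA c = ([leetG c], if leetG c ≠ c then (1 : Int) else 0) := by
  fin_cases h <;> decide

set_option maxRecDepth 100000 in
lemma loop_eq (cs : List Char) : ∀ (acc : List Char × Int), (∀ c ∈ cs, c ∈ charsList) →
    cs.foldl (fun st c => (st.1 ++ (entryA c).1, st.2 + (entryA c).2)) acc
      = (acc.1 ++ cs.map leetG,
         acc.2 + ((cs.zip (cs.map leetG)).countP (fun p => decide (p.1 ≠ p.2)) : Int)) := by
  induction cs with
  | nil => intro acc _; simp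
  | cons c cs ih =>
    intro acc hdom
    have hc := entryA_eq c (hdom c (List.mem_cons_self))
    simp only [List.foldl_cons, List.map_cons, List.zip_cons_cons, List.countP_cons, hc]
    rw [ih _ (fun d hd => hdom d (List.mem_cons_of_mem c hd))]
    by_cases hne : leetG c ≠ c
    · simp [hne]
      rw [if_neg (fun h => hne h.symm)]
      omega
    · simp [hne, List.append_assoc]
      exact (not_not.1 hne).symm

-- A's loop body is exactly the entryA step
lemma bodyA_eq (st : List Char × Int) (c : Char) :
    leetvStep st c = (st.1 ++ (entryA c).1, st.2 + (entryA c).2) := by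
  unfold leetvStep entryA; split_ifs <;> simp

-- ===== VERDICT (by name: the statement is the Claim_ definition above) =====
theorem leetv_spec : Claim_equal_leetv := by
  intro line hdom
  unfold Spec_leetv leetv leetv_alt
  have hall : ∀ c ∈ line.toList, c ∈ charsList := by
    intro c hc
    exact mem_charsList c (by
      have := hdom
      unfold Dom_leetv pvDomStr at this
      exact List.all_eq_true.1 this c hc)
  simp only []
  rw [PySem.List.foldl_pyRange_zero_pyGetD' line.toList ' ' leetvStep ([], 0)]
  simp only [funext fun st => funext fun c => bodyA_eq st c]
  rw [loop_eq _ _ hall]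
  simp only [List.nil_append, zero_add]
  rfl
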